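-- pv_equiv track=rewrite | github.com/eduardocerqueira/seeker | seeker/snippet/prefix_scores.py | prefix_scores
-- ===== SOURCE A (Python) =====
-- def prefix_scores(n, input_list):
--     scores = []
--     for i in range(n):
--         prefix = input_list[:i+1]
--         current_max = max(prefix)
--         updated_prefix = []
--         for n in prefix:
--             number = n + current_max
--             updated_prefix.append(number)
--             current_max = max(current_max, number)
--         scores.append(sum(updated_prefix))
--     return scores
-- ===== SOURCE B (Python) =====
-- def prefix_scores(n, input_list):
--     # One pass: running sum S, running max M, running sum of positive parts P,
--     # and W = sum over earlier positions k of (j-1-k)*max(x_k,0); score_j = S + j*M + W.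
--     if n <= 0:
--         return []
--     scores = []
--     S = 0
--     M = 0
--     P = 0
--     W = 0
--     L = 0
--     for x in input_list[:n]:
--         S += x
--         M = x if L == 0 else max(M, x)
--         W += P
--         P += max(x, 0)
--         L += 1
--         scores.append(S + L * M + W)
--     # for i >= len(input_list) the prefix no longer grows: the score is constant
--     scores += scores[-1:] * (n - L)
--     return scores
-- ===== Notes on version B (the rewrite author's own statement) =====
-- stated objective: faster
-- what changed: Replaces the nested rebuild-each-prefix loop by a single pass maintaining running sum, running max, sum of positive parts and their weighted accumulation, using the closed form score_L = S_L + L*max_L + sum_k (L-1-k)*max(x_k,0), with the constant tail for n > len(input_list) emitted by repetition.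
import Mathlib
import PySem

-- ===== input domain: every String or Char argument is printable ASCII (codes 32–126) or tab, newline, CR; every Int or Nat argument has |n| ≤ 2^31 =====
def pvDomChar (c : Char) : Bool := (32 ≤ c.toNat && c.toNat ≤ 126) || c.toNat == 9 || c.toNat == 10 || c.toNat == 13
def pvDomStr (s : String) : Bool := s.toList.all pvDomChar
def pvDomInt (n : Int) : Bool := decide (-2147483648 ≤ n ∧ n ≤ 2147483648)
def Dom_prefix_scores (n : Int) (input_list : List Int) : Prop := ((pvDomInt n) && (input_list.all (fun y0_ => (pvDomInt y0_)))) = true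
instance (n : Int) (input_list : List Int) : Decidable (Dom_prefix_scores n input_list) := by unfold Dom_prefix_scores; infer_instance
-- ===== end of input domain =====

-- B replaces A's quadratic prefix-rebuilding double loop by one linear pass with a closed-form
-- incremental score (running sum / max / positive-part accumulators); equivalence of return values proved below.

-- ===== PORT A =====
def prefix_scores (n : Int) (input_list : List Int) : List Int :=
  (PySem.List.pyRange 0 n 1).foldl (fun scores i =>
    let pref := PySem.List.slice input_list none (some (i + 1))
    match PySem.List.max? pref (fun y => y) with
    | none => scores   -- Python raises ValueError here (max of empty prefix); excluded by Pre_
    | some current_max =>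
      let st := pref.foldl (fun (st : List Int × Int) nn =>
          let number := nn + st.2
          (st.1 ++ [number], max st.2 number)) (([] : List Int), current_max)
      scores ++ [st.1.sum]) []

-- ===== PORT B =====
def prefix_scores_alt (n : Int) (input_list : List Int) : List Int :=
  if n ≤ 0 then []
  else
    let st := (PySem.List.slice input_list none (some n)).foldl
      (fun (st : List Int × Int × Int × Int × Int × Int) x =>
        let scores := st.1
        let S := st.2.1 + x
        let M := if st.2.2.2.2.2 = 0 then x else max st.2.2.1 x
        let W := st.2.2.2.2.1 + st.2.2.2.1
        let P := st.2.2.2.1 + max x 0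
        let L := st.2.2.2.2.2 + 1
        (scores ++ [S + L * M + W], S, M, P, W, L))
      (([] : List Int), 0, 0, 0, 0, 0)
    let scores := st.1
    -- scores += scores[-1:] * (n - L)
    scores ++ (List.replicate (n - st.2.2.2.2.2).toNat
                 (PySem.List.slice scores (some (-1)) none)).flatten

-- ===== PRECONDITION & SPEC =====
-- Pre_ excludes exactly the inputs where Python A raises: n > 0 with an empty list (max([]) is a ValueError).
def Pre_prefix_scores (n : Int) (input_list : List Int) : Prop := n ≤ 0 ∨ input_list ≠ []
instance (n : Int) (input_list : List Int) : Decidable (Pre_prefix_scores n input_list) := by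
  unfold Pre_prefix_scores; infer_instance
def pvWitness_prefix_scores : Int × List Int := (3, [2, -1, 4])

def Spec_prefix_scores (n : Int) (input_list : List Int) (out : List Int) : Prop := out = prefix_scores_alt n input_list
instance (n : Int) (input_list : List Int) (out : List Int) : Decidable (Spec_prefix_scores n input_list out) := by unfold Spec_prefix_scores; infer_instance

-- ===== CLAIM (what is proved, stated in full; the proofs are below) =====
def Claim_equal_prefix_scores : Prop := ∀ (n : Int) (input_list : List Int), Dom_prefix_scores n input_list → Pre_prefix_scores n input_list → Spec_prefix_scores n input_list (prefix_scores n input_list)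

-- ===== LEMMAS AND PROOFS =====

/-- positive part of an integer -/
def pvPos (x : Int) : Int := max x 0

/-- A's inner loop value stream, summed: g p c = Σ numbers produced from prefix p with running max c. -/
def pvG : List Int → Int → Int
  | [], _ => 0
  | x :: xs, c => (x + c) + pvG xs (max c (x + c))

/-- weighted positive-part sum: w p = Σ_k (|p|-1-k)·pos(p_k). -/
def pvW : List Int → Int
  | [] => 0
  | x :: xs => (xs.length : Int) * pvPos x + pvW xs

/-- max of a nonempty list as Python computes it (0 on []). -/
def pvMx : List Int → Int
  | [] => 0
  | x :: xs => xs.foldl max x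

def pvPsum (l : List Int) : Int := (l.map pvPos).sum

def pvScoreOf (p : List Int) : Int := p.sum + (p.length : Int) * pvMx p + pvW p

def pvPrefixScores (l : List Int) : List Int :=
  (List.range l.length).map (fun j => pvScoreOf (l.take (j + 1)))

theorem pvMaxStep (c x : Int) : max c (x + c) = c + pvPos x := by
  unfold pvPos; omega

theorem pvG_shift (xs : List Int) : ∀ c d : Int, pvG xs (c + d) = pvG xs c + (xs.length : Int) * d := by
  induction xs with
  | nil => intro c d; simp [pvG]
  | cons x t ih =>
    intro c d
    simp only [pvG, pvMaxStep, List.length_cons]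
    have h2 : c + d + pvPos x = (c + pvPos x) + d := by ring
    rw [h2, ih (c + pvPos x) d]
    push_cast
    ring

theorem pvG_closed (p : List Int) : ∀ c : Int, pvG p c = p.sum + (p.length : Int) * c + pvW p := by
  induction p with
  | nil => intro c; simp [pvG, pvW]
  | cons x t ih =>
    intro c
    simp only [pvG, pvMaxStep, pvW, List.sum_cons, List.length_cons]
    rw [pvG_shift t c (pvPos x), ih c]
    push_cast
    ring

/-- A's inner foldl: the accumulated list's sum is acc.sum + pvG p c. -/
theorem pvInnerSum (p : List Int) : ∀ (acc : List Int) (c : Int),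
    ((p.foldl (fun (st : List Int × Int) nn =>
        (st.1 ++ [nn + st.2], max st.2 (nn + st.2))) (acc, c)).1).sum
      = acc.sum + pvG p c := by
  induction p with
  | nil => intro acc c; simp [pvG]
  | cons x t ih =>
    intro acc c
    simp only [List.foldl_cons, pvG]
    rw [ih (acc ++ [x + c]) (max c (x + c))]
    simp
    ring

theorem pvMx_append_singleton (q : List Int) (x : Int) :
    pvMx (q ++ [x]) = if q = [] then x else max (pvMx q) x := by
  cases q with
  | nil => simp [pvMx]
  | cons y ys => simp [pvMx, List.foldl_append]

theorem pvW_append_singleton (q : List Int) (x : Int) :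
    pvW (q ++ [x]) = pvW q + pvPsum q := by
  induction q with
  | nil => simp [pvW, pvPsum]
  | cons y ys ih =>
    simp only [List.cons_append, pvW, ih, pvPsum, List.map_cons, List.sum_cons,
      List.length_append, List.length_cons, List.length_nil]
    push_cast
    ring

theorem pvPrefixScores_append (q : List Int) (x : Int) :
    pvPrefixScores (q ++ [x]) = pvPrefixScores q ++ [pvScoreOf (q ++ [x])] := by
  unfold pvPrefixScores
  rw [List.length_append, List.length_cons, List.length_nil, List.range_succ, List.map_append]
  congr 1
  · apply List.map_congr_left
    intro j hj
    rw [List.mem_range] at hj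
    rw [List.take_append_of_le_length (by omega)]
  · simp only [List.map_cons, List.map_nil]
    rw [List.take_of_length_le (by simp)]

/-- B's fold invariant: folding remaining r from the canonical state of consumed q
    yields the canonical state of q ++ r. -/
theorem pvBfold (r : List Int) : ∀ q : List Int,
    r.foldl (fun (st : List Int × Int × Int × Int × Int × Int) x =>
        let scores := st.1
        let S := st.2.1 + x
        let M := if st.2.2.2.2.2 = 0 then x else max st.2.2.1 x
        let W := st.2.2.2.2.1 + st.2.2.2.1
        let P := st.2.2.2.1 + max x 0
        let L := st.2.2.2.2.2 + 1
        (scores ++ [S + L * M + W], S, M, P, W, L))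
      (pvPrefixScores q, q.sum, pvMx q, pvPsum q, pvW q, (q.length : Int))
    = (pvPrefixScores (q ++ r), (q ++ r).sum, pvMx (q ++ r), pvPsum (q ++ r),
       pvW (q ++ r), ((q ++ r).length : Int)) := by
  induction r with
  | nil => intro q; simp
  | cons x t ih =>
    intro q
    rw [List.foldl_cons]
    have hM : (if (q.length : Int) = 0 then x else max (pvMx q) x) = pvMx (q ++ [x]) := by
      rw [pvMx_append_singleton]
      by_cases h : q = []
      · simp [h]
      · rw [if_neg h, if_neg (by simpa using h)]
    have hS : q.sum + x = (q ++ [x]).sum := by simp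
    have hP : pvPsum q + max x 0 = pvPsum (q ++ [x]) := by
      simp [pvPsum, pvPos]
    have hW : pvW q + pvPsum q = pvW (q ++ [x]) := (pvW_append_singleton q x).symm
    have hL : (q.length : Int) + 1 = ((q ++ [x]).length : Int) := by
      simp
    have hscore : pvPrefixScores q ++
        [(q.sum + x) + ((q.length : Int) + 1) * (if (q.length : Int) = 0 then x else max (pvMx q) x)
          + (pvW q + pvPsum q)] = pvPrefixScores (q ++ [x]) := by
      rw [hM, hS, hW, hL, pvPrefixScores_append]
      rfl
    simp only []
    rw [hscore, hM, hS, hP, hW, hL]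
    have := ih (q ++ [x])
    rw [List.append_assoc] at this
    simpa using this

theorem pvBfold_nil (r : List Int) :
    r.foldl (fun (st : List Int × Int × Int × Int × Int × Int) x =>
        let scores := st.1
        let S := st.2.1 + x
        let M := if st.2.2.2.2.2 = 0 then x else max st.2.2.1 x
        let W := st.2.2.2.2.1 + st.2.2.2.1
        let P := st.2.2.2.1 + max x 0
        let L := st.2.2.2.2.2 + 1
        (scores ++ [S + L * M + W], S, M, P, W, L))
      (([] : List Int), 0, 0, 0, 0, 0)
    = (pvPrefixScores r, r.sum, pvMx r, pvPsum r, pvW r, (r.length : Int)) := by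
  have := pvBfold r []
  simpa [pvPrefixScores, pvPsum, pvW, pvMx] using this

/-- A's step value: for nonempty prefix, the appended score is pvScoreOf of the prefix. -/
theorem pvAstep (l : List Int) (hl : l ≠ []) (i : Int) (hi : 0 ≤ i) (scores : List Int) :
    (let pref := PySem.List.slice l none (some (i + 1))
     match PySem.List.max? pref (fun y => y) with
     | none => scores
     | some current_max =>
       let st := pref.foldl (fun (st : List Int × Int) nn =>
           (st.1 ++ [nn + st.2], max st.2 (nn + st.2))) (([] : List Int), current_max)
       scores ++ [st.1.sum])
    = scores ++ [pvScoreOf (l.take (i + 1).toNat)] := by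
  have hsl : PySem.List.slice l none (some (i + 1)) = l.take (i + 1).toNat :=
    PySem.List.slice_to l (by omega)
  have hne : l.take (i + 1).toNat ≠ [] := by
    cases l with
    | nil => exact absurd rfl hl
    | cons y ys =>
      have : 1 ≤ (i + 1).toNat := by omega
      cases htn : (i + 1).toNat with
      | zero => omega
      | succ k => simp [List.take]
  simp only [hsl]
  obtain ⟨y, ys, hq⟩ := List.exists_cons_of_ne_nil hne
  rw [hq]
  rw [PySem.List.max?_id_cons]
  simp only []
  rw [pvInnerSum (y :: ys) [] (ys.foldl max y)]
  rw [pvG_closed]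
  have : pvMx (y :: ys) = ys.foldl max y := rfl
  simp [pvScoreOf, this]

/-- A on nonempty lists is the map of pvScoreOf over the clamped prefixes. -/
theorem pvA_eq_map (n : Int) (l : List Int) (hl : l ≠ []) :
    prefix_scores n l = (List.range n.toNat).map (fun k => pvScoreOf (l.take (k + 1))) := by
  unfold prefix_scores
  rw [PySem.List.pyRange_one 0 n]
  simp only [Int.sub_zero, Int.zero_add]
  refine (PySem.List.foldl_congr_mem _ _
      (fun (scores : List Int) (i : Int) => scores ++ [pvScoreOf (l.take (i + 1).toNat)]) _ ?_).trans ?_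
  · intro acc x hx
    rw [List.mem_map] at hx
    obtain ⟨k, hk, rfl⟩ := hx
    exact pvAstep l hl (k : Int) (by positivity) acc
  · rw [List.foldl_map, PySem.List.foldl_append_singleton_eq_map]
    simp only [List.nil_append]
    apply List.map_congr_left
    intro k hk
    congr 1

theorem pvTake_take (l : List Int) (m j : Nat) (hj : j + 1 ≤ m) :
    (l.take m).take (j + 1) = l.take (j + 1) := by
  rw [List.take_take]
  congr 1
  omega

theorem pvFlatten_replicate (k : Nat) (c : Int) :
    (List.replicate k [c]).flatten = List.replicate k c := by
  induction k with
  | zero => simp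
  | succ m ih => simp [List.replicate_succ, ih]

theorem pvRange_split (m tl : Nat) (h : tl ≤ m) (f : Nat → Int) :
    (List.range m).map f
      = (List.range tl).map f ++ (List.range (m - tl)).map (fun k => f (tl + k)) := by
  have : m = tl + (m - tl) := by omega
  rw [this, List.range_add, List.map_append, List.map_map]
  simp [Function.comp]

-- ===== VERDICT (by name: the statement is the Claim_ definition above) =====
theorem prefix_scores_spec : Claim_equal_prefix_scores := by
  intro n l _ hpre
  unfold Spec_prefix_scores
  by_cases hn : n ≤ 0
  · unfold prefix_scores prefix_scores_alt
    rw [PySem.List.pyRange_one_eq_nil (by omega)]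
    simp [hn]
  · have hl : l ≠ [] := by
      rcases hpre with h | h
      · omega
      · exact h
    rw [Int.not_le] at hn
    -- B side
    unfold prefix_scores_alt
    rw [if_neg (by omega)]
    have hsl : PySem.List.slice l none (some n) = l.take n.toNat :=
      PySem.List.slice_to l (by omega)
    simp only [hsl, pvBfold_nil]
    set t := l.take n.toNat with ht
    have htne : t ≠ [] := by
      cases l with
      | nil => exact absurd rfl hl
      | cons y ys =>
        have : 1 ≤ n.toNat := by omega
        cases htn : n.toNat with
        | zero => omega
        | succ k => simp [ht, htn]
    -- last-element slice of scores
    have hlen : (pvPrefixScores t).length = t.length := by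
      simp [pvPrefixScores]
    have htl1 : 0 < t.length := List.length_pos_of_ne_nil htne
    have hslice : PySem.List.slice (pvPrefixScores t) (some (-1)) none = [pvScoreOf t] := by
      obtain ⟨k, hk⟩ : ∃ k, t.length = k + 1 := ⟨t.length - 1, by omega⟩
      rw [PySem.List.slice_from_neg_one, hlen]
      unfold pvPrefixScores
      rw [← List.map_drop, hk]
      rw [show (List.range (k + 1)).drop (k + 1 - 1) = [k] from by
        rw [Nat.add_sub_cancel, List.range_succ]
        simpa using List.drop_left (l₁ := List.range k) (l₂ := [k])]
      simp only [List.map_cons, List.map_nil]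
      congr 1
      rw [← hk, List.take_of_length_le (le_refl _)]
    rw [hslice, pvFlatten_replicate]
    -- A side
    rw [pvA_eq_map n l hl]
    have htl : t.length = min n.toNat l.length := by simp [ht]
    have htlm : t.length ≤ n.toNat := by omega
    rw [pvRange_split n.toNat t.length htlm]
    congr 1
    · -- heads: prefixScores t = map over range t.length of scoreOf (l.take (k+1))
      unfold pvPrefixScores
      apply List.map_congr_left
      intro j hj
      rw [List.mem_range] at hj
      rw [ht, pvTake_take l n.toNat j (by omega)]
    · -- tail: all entries equal scoreOf t, count n.toNat - t.length
      have hcnt : (n - (t.length : Int)).toNat = n.toNat - t.length := by omega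
      rw [hcnt]
      rw [show List.replicate (n.toNat - t.length) (pvScoreOf t)
            = (List.range (n.toNat - t.length)).map (fun _ => pvScoreOf t) from by
          simp [List.map_const']]
      apply List.map_congr_left
      intro k hk
      rw [List.mem_range] at hk
      -- here n.toNat > l.length is forced unless the range is empty
      have hll : t.length = l.length := by omega
      have : l.take (t.length + k + 1) = l := List.take_of_length_le (by omega)
      rw [this]
      congr 1
      rw [ht, List.take_of_length_le (by omega)]
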